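-- pv_equiv track=rewrite | github.com/Zackon123-afk/Code_TFG | Code/analize_corpus.py | contUnicSignosPunt
-- ===== SOURCE A (Python) =====
-- import string
--
-- def contUnicSignosPunt(stringtoCheck):
--     list_sign = dict([])
--     for i in stringtoCheck:
--         if i in string.punctuation:
--             if ( list_sign.get(i) ==  None ):
--                 list_sign[i] = 1
--             else:
--                 list_sign[i] = int(list_sign[i]) + 1
--     return list_sign
-- ===== SOURCE B (Python) =====
-- import string
--
-- def contUnicSignosPunt(stringtoCheck):
--     chars = list(stringtoCheck)
--     return {c: chars.count(c)
--             for c in dict.fromkeys(chars)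
--             if c in string.punctuation}
-- ===== Notes on version B (the rewrite author's own statement) =====
-- stated objective: idiomatic
-- what changed: Replaces A's single accumulating pass with dict-get/insert bookkeeping by a dict comprehension over the first-appearance-ordered distinct characters (dict.fromkeys), counting each punctuation character with list.count.
import Mathlib
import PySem

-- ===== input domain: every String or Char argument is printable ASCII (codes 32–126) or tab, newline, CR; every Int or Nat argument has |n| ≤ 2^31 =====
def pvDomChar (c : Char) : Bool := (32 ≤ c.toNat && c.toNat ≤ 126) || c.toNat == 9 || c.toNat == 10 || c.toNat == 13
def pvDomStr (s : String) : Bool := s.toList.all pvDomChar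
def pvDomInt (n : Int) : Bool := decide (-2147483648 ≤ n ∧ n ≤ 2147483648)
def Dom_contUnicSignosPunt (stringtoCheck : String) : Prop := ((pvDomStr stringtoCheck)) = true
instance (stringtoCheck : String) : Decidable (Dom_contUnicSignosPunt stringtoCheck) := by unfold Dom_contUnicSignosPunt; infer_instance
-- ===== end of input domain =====

-- B replaces A's accumulating dict-get/insert pass by a dict comprehension over the
-- first-appearance-ordered distinct characters (dict.fromkeys) with a per-character count (idiomatic; not faster).

-- string.punctuation, as its list of characters
def pyPunct : List Char := "!\"#$%&'()*+,-./:;<=>?@[\\]^_`{|}~".toList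

-- ===== PORT A =====
-- `i in string.punctuation` for the single character i is character membership (exact);
-- Python's dict keys are the one-character strings, hence String.singleton i.
def contUnicSignosPunt (stringtoCheck : String) : List (String × Int) :=
  (stringtoCheck.toList.foldl
    (fun list_sign i =>
      if pyPunct.contains i then
        match list_sign.get? (String.singleton i) with
        | none => list_sign.insert (String.singleton i) 1
        | some v => list_sign.insert (String.singleton i) (v + 1)
      else list_sign)
    (PySem.Dict.empty : PySem.Dict String Int)).items

-- ===== PORT B =====
-- dict.fromkeys(chars) is PySem.List.dedup; the dict comprehension iterates these distinct
-- keys (so no key repeats) and is therefore exactly this filtered map, in order;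
-- chars.count(c) is List.count (exact: chars is list(stringtoCheck)).
def contUnicSignosPunt_alt (stringtoCheck : String) : List (String × Int) :=
  ((PySem.List.dedup stringtoCheck.toList).filter (fun c => pyPunct.contains c)).map
    (fun c => (String.singleton c, (stringtoCheck.toList.count c : Int)))

-- ===== PRECONDITION & SPEC =====
def Spec_contUnicSignosPunt (stringtoCheck : String) (out : List (String × Int)) : Prop := out = contUnicSignosPunt_alt stringtoCheck
instance (stringtoCheck : String) (out : List (String × Int)) : Decidable (Spec_contUnicSignosPunt stringtoCheck out) := by unfold Spec_contUnicSignosPunt; infer_instance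

-- ===== CLAIM (what is proved, stated in full; the proofs are below) =====
def Claim_equal_contUnicSignosPunt : Prop := ∀ (stringtoCheck : String), Dom_contUnicSignosPunt stringtoCheck → Spec_contUnicSignosPunt stringtoCheck (contUnicSignosPunt stringtoCheck)

-- ===== LEMMAS AND PROOFS =====

theorem singleton_injective : Function.Injective String.singleton := by
  intro a b h
  have := congrArg String.toList h
  simpa using this

-- PySem.Set.ofList (first-occurrence dedup) commutes with filter (accumulator-generalised).
theorem ofList_filter {α : Type} [BEq α] [LawfulBEq α] (p : α → Bool) (xs acc : List α) :
    List.foldl PySem.Set.add (acc.filter p) (xs.filter p) = (List.foldl PySem.Set.add acc xs).filter p := by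
  induction xs generalizing acc with
  | nil => simp
  | cons x t ih =>
    by_cases hm : x ∈ acc
    · by_cases hp : p x
      · have hadd : PySem.Set.add (acc.filter p) x = (PySem.Set.add acc x).filter p := by
          simp [PySem.Set.add, PySem.Set.contains, hm, List.mem_filter, hp]
        simp [hp, List.foldl_cons, hadd, ih]
      · have hadd : (PySem.Set.add acc x).filter p = acc.filter p := by
          simp [PySem.Set.add, PySem.Set.contains, hm]
        simp only [List.filter_cons, hp, Bool.false_eq_true, if_false, List.foldl_cons,
          ← hadd, ih (PySem.Set.add acc x)]
    · by_cases hp : p x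
      · have hadd : PySem.Set.add (acc.filter p) x = (PySem.Set.add acc x).filter p := by
          simp [PySem.Set.add, PySem.Set.contains, hm, List.mem_filter, List.filter_append, hp]
        simp [hp, List.foldl_cons, hadd, ih]
      · have hadd : (PySem.Set.add acc x).filter p = acc.filter p := by
          simp [PySem.Set.add, PySem.Set.contains, hm, List.filter_append, hp]
        simp only [List.filter_cons, hp, Bool.false_eq_true, if_false, List.foldl_cons,
          ← hadd, ih (PySem.Set.add acc x)]

-- PySem.Set.ofList commutes with an injective map (accumulator-generalised).
theorem ofList_map {α β : Type} [BEq α] [LawfulBEq α] [BEq β] [LawfulBEq β]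
    (σ : α → β) (hσ : Function.Injective σ) (xs acc : List α) :
    List.foldl PySem.Set.add (acc.map σ) (xs.map σ) = (List.foldl PySem.Set.add acc xs).map σ := by
  induction xs generalizing acc with
  | nil => simp
  | cons x t ih =>
    have hadd : PySem.Set.add (acc.map σ) (σ x) = (PySem.Set.add acc x).map σ := by
      by_cases hm : x ∈ acc <;>
        simp [PySem.Set.add, PySem.Set.contains, hm, hσ.eq_iff]
    simp [List.foldl_cons, hadd, ih]

-- A's loop body, written as the canonical counter step.
theorem stepA_eq :
    (fun (list_sign : PySem.Dict String Int) (i : Char) =>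
      if pyPunct.contains i then
        match list_sign.get? (String.singleton i) with
        | none => list_sign.insert (String.singleton i) 1
        | some v => list_sign.insert (String.singleton i) (v + 1)
      else list_sign)
    = (fun (d : PySem.Dict String Int) (i : Char) =>
        if pyPunct.contains i then d.insert (String.singleton i) (d.getD (String.singleton i) 0 + 1) else d) := by
  funext d i
  by_cases hp : pyPunct.contains i
  · simp only [hp, if_true, PySem.Dict.getD]
    cases d.get? (String.singleton i) <;> simp
  · have hm : i ∉ pyPunct := by simpa using hp
    simp [hm]

-- ===== VERDICT (by name: the statement is the Claim_ definition above) =====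
theorem contUnicSignosPunt_spec : Claim_equal_contUnicSignosPunt := by
  intro s _
  unfold Spec_contUnicSignosPunt contUnicSignosPunt contUnicSignosPunt_alt
  rw [stepA_eq]
  rw [show (fun (d : PySem.Dict String Int) (i : Char) =>
        if pyPunct.contains i then d.insert (String.singleton i) (d.getD (String.singleton i) 0 + 1) else d)
      = (fun d i => if pyPunct.contains i = true then d.insert (String.singleton i) (d.getD (String.singleton i) 0 + 1) else d) from rfl,
     ← List.foldl_filter (p := fun i => pyPunct.contains i)
       (f := fun (d : PySem.Dict String Int) (i : Char) => d.insert (String.singleton i) (d.getD (String.singleton i) 0 + 1)),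
     ← List.foldl_map (f := String.singleton)
       (g := fun (d : PySem.Dict String Int) k => d.insert k (d.getD k 0 + 1)),
     PySem.Dict.foldl_insert_getD_add_one_eq_counter, PySem.Dict.items_counter]
  have hset : PySem.Set.ofList ((s.toList.filter (fun i => pyPunct.contains i)).map String.singleton)
      = ((PySem.List.dedup s.toList).filter (fun c => pyPunct.contains c)).map String.singleton := by
    have h1 := ofList_map String.singleton singleton_injective
      (s.toList.filter (fun i => pyPunct.contains i)) []
    have h2 := ofList_filter (fun i => pyPunct.contains i) s.toList []
    simp only [List.map_nil, List.filter_nil] at h1 h2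
    simp only [PySem.List.dedup, PySem.Set.ofList, PySem.Set.empty]
    rw [h1, h2]
  rw [hset, List.map_map]
  refine List.map_congr_left ?_
  intro c hc
  rcases List.mem_filter.mp hc with ⟨-, hpc⟩
  simp only [Function.comp_apply]
  rw [List.count_map_of_injective _ _ singleton_injective,
      List.count_filter hpc]
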